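-- pv_equiv track=rewrite | github.com/tmu-nlp/100knock2020 | kiyuna/chapter03/knock25.py | parse
-- ===== SOURCE A (Python) =====
-- from typing import List
--
-- def parse(text: str, bracket: str = "{}", endl: str = "<br />") -> List[str]:
--     res = []
--     stack = []
--     init = True
--     begin, end = bracket
--     for c in text:
--         if c in bracket:
--             if c == begin:
--                 res.append(" " * len(stack) + begin)
--                 stack.append(c)
--             elif c == end:
--                 stack.pop(-1)
--                 res.append(" " * len(stack) + end)
--             init = True
--         else:
--             if init:
--                 res.append(" " * len(stack))
--                 init = False
--             res[-1] += endl if c == "\n" else c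
--     return res
-- ===== SOURCE B (Python) =====
-- from typing import List
--
-- def parse(text: str, bracket: str = "{}", endl: str = "<br />") -> List[str]:
--     begin, end = bracket
--     # Phase 1: tokenize into bracket tokens and maximal text-run tokens.
--     tokens = []
--     run = None
--     for c in text:
--         if c in bracket:
--             if run is not None:
--                 tokens.append((True, run))
--                 run = None
--             tokens.append((False, c))
--         else:
--             run = (run or "") + (endl if c == "\n" else c)
--     if run is not None:
--         tokens.append((True, run))
--     # Phase 2: render each token as one indented line, tracking a bracket stack.
--     out = []
--     stack = []
--     for is_run, v in tokens:
--         if not is_run and v == begin: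
--             out.append(" " * len(stack) + begin)
--             stack.append(v)
--         elif not is_run:
--             stack.pop(-1)
--             out.append(" " * len(stack) + end)
--         else:
--             out.append(" " * len(stack) + v)
--     return out
-- ===== Notes on version B (the rewrite author's own statement) =====
-- stated objective: alternative
-- what changed: A is one fused loop that mutates the last emitted line in place under an init flag; B first tokenizes the text into bracket tokens and maximal text-run tokens, then a second pass renders exactly one indented line per token over a bracket stack.
import Mathlib
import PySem

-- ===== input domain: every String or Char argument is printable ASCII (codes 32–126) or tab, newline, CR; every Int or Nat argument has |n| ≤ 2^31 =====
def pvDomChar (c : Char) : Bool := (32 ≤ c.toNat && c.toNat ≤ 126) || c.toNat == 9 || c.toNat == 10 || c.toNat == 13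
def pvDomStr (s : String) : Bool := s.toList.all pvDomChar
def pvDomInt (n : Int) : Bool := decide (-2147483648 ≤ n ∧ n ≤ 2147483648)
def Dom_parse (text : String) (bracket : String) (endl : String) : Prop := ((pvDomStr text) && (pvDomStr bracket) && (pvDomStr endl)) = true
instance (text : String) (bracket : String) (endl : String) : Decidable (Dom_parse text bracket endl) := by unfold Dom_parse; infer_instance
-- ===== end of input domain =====

-- B replaces A's single fused loop (mutating the last line in place under an `init` flag)
-- by a tokenize-then-render decomposition: same cost, different structure ("alternative").

-- ===== PORT A =====
-- append x to the last line of res (Python's res[-1] += x; res is nonempty whenever A reaches it)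
def pvAppendLast (l : List (List Char)) (x : List Char) : List (List Char) :=
  match l with
  | [] => []
  | [a] => [a ++ x]
  | a :: rest => a :: pvAppendLast rest x

-- A's loop; state (res, stack, init); `none` = the pop raised IndexError (outside Pre_)
def parseGoA (b0 e0 : Char) (endl : List Char) :
    List Char → List (List Char) → List Char → Bool → Option (List (List Char))
  | [], res, _, _ => some res
  | c :: cs, res, stack, init =>
    if c = b0 ∨ c = e0 then
      if c = b0 then
        parseGoA b0 e0 endl cs (res ++ [List.replicate stack.length ' ' ++ [b0]]) (c :: stack) true
      else if c = e0 then
        match stack with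
        | [] => none
        | _ :: tl => parseGoA b0 e0 endl cs (res ++ [List.replicate tl.length ' ' ++ [e0]]) tl true
      else
        parseGoA b0 e0 endl cs res stack true
    else
      let res' := if init then res ++ [List.replicate stack.length ' '] else res
      parseGoA b0 e0 endl cs (pvAppendLast res' (if c = '\n' then endl else [c])) stack false

def parse (text : String) (bracket : String) (endl : String) : List String :=
  match bracket.toList with
  | [b0, e0] => ((parseGoA b0 e0 endl.toList text.toList [] [] true).getD []).map String.ofList
  | _ => []   -- Python raises ValueError unpacking `begin, end = bracket` (outside Pre_)

-- ===== PORT B =====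
-- Phase 1: token list; Sum.inl = bracket char, Sum.inr = maximal text run; `run` is the pending run
def parseTok (b0 e0 : Char) (endl : List Char) :
    List Char → Option (List Char) → List (Char ⊕ List Char)
  | [], none => []
  | [], some r => [Sum.inr r]
  | c :: cs, run =>
    if c = b0 ∨ c = e0 then
      (match run with | none => [] | some r => [Sum.inr r]) ++
        Sum.inl c :: parseTok b0 e0 endl cs none
    else
      parseTok b0 e0 endl cs (some (run.getD [] ++ (if c = '\n' then endl else [c])))

-- Phase 2: one indented output line per token; `none` = the pop raised IndexError (outside Pre_)
def parseRender (b0 e0 : Char) :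
    List (Char ⊕ List Char) → List (List Char) → List Char → Option (List (List Char))
  | [], out, _ => some out
  | Sum.inl c :: ts, out, stack =>
    if c = b0 then
      parseRender b0 e0 ts (out ++ [List.replicate stack.length ' ' ++ [b0]]) (c :: stack)
    else
      match stack with
      | [] => none
      | _ :: tl => parseRender b0 e0 ts (out ++ [List.replicate tl.length ' ' ++ [e0]]) tl
  | Sum.inr r :: ts, out, stack =>
    parseRender b0 e0 ts (out ++ [List.replicate stack.length ' ' ++ r]) stack

def parse_alt (text : String) (bracket : String) (endl : String) : List String :=
  if bracket.toList.length = 2 then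
    let b0 := bracket.toList.getD 0 ' '
    let e0 := bracket.toList.getD 1 ' '
    ((parseRender b0 e0 (parseTok b0 e0 endl.toList text.toList none) [] []).getD []).map String.ofList
  else []   -- Python raises ValueError unpacking `begin, end = bracket` (outside Pre_)

-- ===== PRECONDITION & SPEC =====
-- Pre_ excludes exactly the inputs where Python A raises: a bracket string whose length is not 2
-- (ValueError on unpacking) and, when the two bracket chars differ, a text with some prefix holding
-- more closing than opening brackets (IndexError on stack.pop).
def Pre_parse (text : String) (bracket : String) (endl : String) : Prop :=
  bracket.toList.length = 2 ∧
    (bracket.toList.getD 0 ' ' = bracket.toList.getD 1 ' ' ∨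
      ∀ p ∈ text.toList.inits,
        p.count (bracket.toList.getD 1 ' ') ≤ p.count (bracket.toList.getD 0 ' '))
instance (text : String) (bracket : String) (endl : String) : Decidable (Pre_parse text bracket endl) := by unfold Pre_parse; infer_instance

def pvWitness_parse : String × String × String := ("a{b\nc{d}}e", "{}", "<br />")

def Spec_parse (text : String) (bracket : String) (endl : String) (out : List String) : Prop := out = parse_alt text bracket endl
instance (text : String) (bracket : String) (endl : String) (out : List String) : Decidable (Spec_parse text bracket endl out) := by unfold Spec_parse; infer_instance

-- ===== CLAIM (what is proved, stated in full; the proofs are below) =====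
def Claim_equal_parse : Prop := ∀ (text : String) (bracket : String) (endl : String), Dom_parse text bracket endl → Pre_parse text bracket endl → Spec_parse text bracket endl (parse text bracket endl)

-- ===== LEMMAS AND PROOFS =====

-- the single line B still holds back while A has already emitted it
def pvPend (stack : List Char) : Option (List Char) → List (List Char)
  | none => []
  | some r => [List.replicate stack.length ' ' ++ r]

theorem pvAppendLast_snoc (l : List (List Char)) (a x : List Char) :
    pvAppendLast (l ++ [a]) x = l ++ [a ++ x] := by
  induction l with
  | nil => simp [pvAppendLast]
  | cons h t ih =>
    cases t with
    | nil => simp [pvAppendLast]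
    | cons h' t' => simpa [pvAppendLast] using ih

theorem go_eq (b0 e0 : Char) (endl : List Char) :
    ∀ (cs : List Char) (res : List (List Char)) (stack : List Char) (run : Option (List Char)),
      parseGoA b0 e0 endl cs (res ++ pvPend stack run) stack run.isNone =
        parseRender b0 e0 (parseTok b0 e0 endl cs run) res stack := by
  intro cs
  induction cs with
  | nil =>
    intro res stack run
    cases run <;> simp [parseGoA, parseTok, parseRender, pvPend]
  | cons c cs ih =>
    intro res stack run
    by_cases hbr : c = b0 ∨ c = e0
    · -- bracket char: B flushes the pending run, then both emit the bracket line
      rw [parseTok.eq_def]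
      simp only [hbr, if_pos]
      have flush : ∀ (res' : List (List Char)) (stack' : List Char),
          parseRender b0 e0
            ((match run with | none => [] | some r => [Sum.inr r]) ++
              Sum.inl c :: parseTok b0 e0 endl cs none) res' stack' =
          parseRender b0 e0 (Sum.inl c :: parseTok b0 e0 endl cs none)
            (res' ++ pvPend stack' run) stack' := by
        intro res' stack'
        cases run <;> simp [parseRender, pvPend]
      rw [flush]
      rw [parseGoA.eq_def]
      simp only [hbr, if_pos]
      by_cases hb : c = b0
      · subst hb
        rw [parseRender.eq_def]
        simp only []
        have := ih (res ++ pvPend stack run ++ [List.replicate stack.length ' ' ++ [c]])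
          (c :: stack) none
        simpa [pvPend, if_pos rfl] using this
      · have he : c = e0 := hbr.resolve_left hb
        subst he
        rw [parseRender.eq_def]
        simp only [if_neg hb]
        cases stack with
        | nil => simp
        | cons s tl =>
          simp only []
          have := ih (res ++ pvPend (s :: tl) run ++ [List.replicate tl.length ' ' ++ [c]]) tl none
          simpa [pvPend, hb] using this
    · -- plain char: A extends its last line, B extends the pending run
      rw [parseTok.eq_def, parseGoA.eq_def]
      simp only [hbr, if_neg, not_false_iff]
      have := ih res stack (some (run.getD [] ++ (if c = '\n' then endl else [c])))
      rw [← this]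
      cases run with
      | none =>
        simp [pvPend, pvAppendLast_snoc]
      | some r =>
        have : pvAppendLast (res ++ [List.replicate stack.length ' ' ++ r])
            (if c = '\n' then endl else [c]) =
            res ++ [List.replicate stack.length ' ' ++
              (r ++ (if c = '\n' then endl else [c]))] := by
          rw [pvAppendLast_snoc]; simp
        simp [pvPend, this]

theorem parse_eq_alt (text bracket endl : String) : parse text bracket endl = parse_alt text bracket endl := by
  unfold parse parse_alt
  rcases h : bracket.toList with _ | ⟨b0, _ | ⟨e0, _ | rest⟩⟩ <;> simp <;> try omega
  have h2 := go_eq b0 e0 endl.toList text.toList [] [] none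
  simp only [pvPend, Option.isNone, List.append_nil] at h2
  exact congrArg (fun o => (o.getD []).map String.ofList) h2

-- ===== VERDICT (by name: the statement is the Claim_ definition above) =====
theorem parse_spec : Claim_equal_parse := by
  intro text bracket endl _ _
  unfold Spec_parse
  exact parse_eq_alt text bracket endl
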